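-- pv_equiv track=rewrite | github.com/abdanhafidz/teaching-portfolio | Assistant Lecturer/Data Structure/Practicum/2/Question/mas_faiz_solution.py | count_height
-- ===== SOURCE A (Python) =====
-- def count_height(tree: dict, parent):
--     if tree.get(parent) == None or parent not in tree.keys():
--         return 1
--     max_child_height = 0
--     for child in tree[parent]:
--         child_height = count_height(tree, child)
--         max_child_height = max(max_child_height, child_height)
--     return 1 + max_child_height
-- ===== SOURCE B (Python) =====
-- def count_height(tree: dict, parent):
--     level = 0
--     queue = [parent]
--     while queue:
--         next_queue = []
--         for node in queue:
--             children = tree.get(node)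
--             if children is not None and node in tree.keys():
--                 next_queue.extend(children)
--         queue = next_queue
--         level += 1
--     return level
-- ===== Notes on version B (the rewrite author's own statement) =====
-- stated objective: alternative
-- what changed: Replaced the recursive depth-first height (max over child subtree heights) by an iterative breadth-first level-order traversal with a FIFO frontier that counts levels until the frontier empties.
import Mathlib
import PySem

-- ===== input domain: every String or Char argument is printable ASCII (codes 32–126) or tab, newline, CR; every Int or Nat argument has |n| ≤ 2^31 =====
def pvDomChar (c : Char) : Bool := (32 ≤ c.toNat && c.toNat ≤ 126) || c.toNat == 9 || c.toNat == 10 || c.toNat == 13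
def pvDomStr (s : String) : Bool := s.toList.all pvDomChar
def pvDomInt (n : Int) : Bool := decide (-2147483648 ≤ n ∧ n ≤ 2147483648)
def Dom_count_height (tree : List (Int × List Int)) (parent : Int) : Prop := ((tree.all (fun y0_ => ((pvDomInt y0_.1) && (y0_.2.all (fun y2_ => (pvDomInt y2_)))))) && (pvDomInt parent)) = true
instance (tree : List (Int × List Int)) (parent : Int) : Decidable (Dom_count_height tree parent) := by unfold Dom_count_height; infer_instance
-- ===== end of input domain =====

-- B replaces A's recursive depth-first height computation by an iterative breadth-first
-- level count over a FIFO frontier (alternative decomposition; same asymptotic cost).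
-- On inputs with a cycle reachable from `parent` both Pythons fail to return
-- (A raises RecursionError, B loops); those inputs are outside Pre_ below.
-- Both Lean ports are fuel-bounded transcriptions: the fuel (tree.length + 1) is a
-- totality guard only, never reached on inputs satisfying Pre_.

-- ===== PORT A =====
def count_height_fuel (tree : List (Int × List Int)) : Nat → Int → Int
  | 0, _ => 1
  | s+1, parent =>
    if (PySem.Dict.mk tree).get? parent = none ∨ parent ∉ (PySem.Dict.mk tree).keys then 1
    else
      1 + (((PySem.Dict.mk tree).get? parent).getD []).foldl
            (fun m c => max m (count_height_fuel tree s c)) 0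

def count_height (tree : List (Int × List Int)) (parent : Int) : Int :=
  count_height_fuel tree (tree.length + 1) parent

-- ===== PORT B =====
def count_height_bfs (tree : List (Int × List Int)) : Nat → List Int → Int → Int
  | 0, _, level => level
  | fuel+1, queue, level =>
    if queue = [] then level
    else
      count_height_bfs tree fuel
        (queue.foldl (fun acc node =>
          match (PySem.Dict.mk tree).get? node with
          | some cs => if node ∈ (PySem.Dict.mk tree).keys then acc ++ cs else acc
          | none => acc) [])
        (level + 1)

def count_height_alt (tree : List (Int × List Int)) (parent : Int) : Int :=
  count_height_bfs tree (tree.length + 1) [parent] 0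

-- ===== PRECONDITION & SPEC =====
-- pvLongPath tree s a decides a GRAPH property of the input: "there is a directed path of
-- exactly s edges starting at a". It is not a copy of either port's algorithm (the ports
-- compute heights / level counts, never path existence); it is only the bounded-quantifier
-- evaluation of this reachability condition, which has no quantifier-free equivalent.
def pvLongPath (tree : List (Int × List Int)) : Nat → Int → Bool
  | 0, _ => true
  | s+1, a =>
    match (PySem.Dict.mk tree).get? a with
    | some cs => cs.any (fun c => pvLongPath tree s c)
    | none => false

-- Pre_ excludes exactly the inputs on which a cycle is reachable from `parent`
-- (equivalently: some path from `parent` has more edges than there are keys),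
-- where Python A raises RecursionError and Python B loops forever.
def Pre_count_height (tree : List (Int × List Int)) (parent : Int) : Prop :=
  pvLongPath tree (tree.length + 1) parent = false
instance (tree : List (Int × List Int)) (parent : Int) : Decidable (Pre_count_height tree parent) := by unfold Pre_count_height; infer_instance

def pvWitness_count_height : (List (Int × List Int)) × Int := ([(0, [1, 2]), (1, []), (2, [3])], 0)

def Spec_count_height (tree : List (Int × List Int)) (parent : Int) (out : Int) : Prop := out = count_height_alt tree parent
instance (tree : List (Int × List Int)) (parent : Int) (out : Int) : Decidable (Spec_count_height tree parent out) := by unfold Spec_count_height; infer_instance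

-- ===== CLAIM (what is proved, stated in full; the proofs are below) =====
def Claim_equal_count_height : Prop := ∀ (tree : List (Int × List Int)) (parent : Int), Dom_count_height tree parent → Pre_count_height tree parent → Spec_count_height tree parent (count_height tree parent)

-- ===== LEMMAS AND PROOFS =====

-- the children a node is expanded to (both programs use the same leaf guard)
def pvChildren (tree : List (Int × List Int)) (n : Int) : List Int :=
  match (PySem.Dict.mk tree).get? n with
  | some cs => if n ∈ (PySem.Dict.mk tree).keys then cs else []
  | none => []

-- max of g over a list, starting at 0 (the shape of A's inner loop)
def pvLmax (g : Int → Int) (l : List Int) : Int :=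
  l.foldl (fun m n => max m (g n)) 0

lemma pvLmax_aux (g : Int → Int) (l : List Int) : ∀ (a b : Int),
    l.foldl (fun m n => max m (g n)) (max a b) = max a (l.foldl (fun m n => max m (g n)) b) := by
  induction l with
  | nil => intro a b; rfl
  | cons n l ih =>
    intro a b
    simp only [List.foldl_cons, max_assoc]
    exact ih a (max b (g n))

lemma pvLmax_nonneg (g : Int → Int) (l : List Int) : 0 ≤ pvLmax g l := by
  have h : ∀ (l : List Int) (a : Int), a ≤ l.foldl (fun m n => max m (g n)) a := by
    intro l
    induction l with
    | nil => intro a; exact le_refl a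
    | cons n l ih => intro a; exact le_trans (le_max_left a (g n)) (ih _)
  exact h l 0

lemma pvLmax_append (g : Int → Int) (l1 l2 : List Int) :
    pvLmax g (l1 ++ l2) = max (pvLmax g l1) (pvLmax g l2) := by
  unfold pvLmax
  rw [List.foldl_append]
  have h0 : l2.foldl (fun m n => max m (g n)) (l1.foldl (fun m n => max m (g n)) 0)
      = l2.foldl (fun m n => max m (g n)) (max (pvLmax g l1) 0) := by
    rw [max_eq_left (pvLmax_nonneg g l1)]; rfl
  rw [h0, pvLmax_aux]
  rfl

lemma pvLmax_flatMap (g : Int → Int) (ch : Int → List Int) (l : List Int) :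
    pvLmax g (l.flatMap ch) = pvLmax (fun n => pvLmax g (ch n)) l := by
  induction l with
  | nil => rfl
  | cons n l ih =>
    rw [List.flatMap_cons, pvLmax_append, ih]
    have h0 : pvLmax (fun k => pvLmax g (ch k)) (n :: l)
        = List.foldl (fun m k => max m (pvLmax g (ch k))) (max 0 (pvLmax g (ch n))) l := rfl
    rw [h0, show (max 0 (pvLmax g (ch n))) = max (pvLmax g (ch n)) 0 from max_comm _ _,
        pvLmax_aux (fun k => pvLmax g (ch k)) l (pvLmax g (ch n)) 0]
    rfl

lemma pvLmax_one_add (h : Int → Int) (hnn : ∀ n, 0 ≤ h n) (l : List Int) (hne : l ≠ []) :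
    pvLmax (fun n => 1 + h n) l = 1 + pvLmax h l := by
  have aux : ∀ (l : List Int) (a : Int),
      l.foldl (fun m n => max m (1 + h n)) (1 + a) = 1 + l.foldl (fun m n => max m (h n)) a := by
    intro l
    induction l with
    | nil => intro a; rfl
    | cons n l ih =>
      intro a
      simp only [List.foldl_cons]
      rw [max_add_add_left, ih]
  cases l with
  | nil => exact absurd rfl hne
  | cons n l =>
    unfold pvLmax
    simp only [List.foldl_cons]
    rw [max_eq_right (by have := hnn n; omega : (0:Int) ≤ 1 + h n),
        max_eq_right (hnn n), aux]

-- A's recursion, one step, written with pvChildren (the guard folds in)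
lemma count_height_fuel_succ (tree : List (Int × List Int)) (s : Nat) (n : Int) :
    count_height_fuel tree (s+1) n = 1 + pvLmax (count_height_fuel tree s) (pvChildren tree n) := by
  cases hg : (PySem.Dict.mk tree).get? n with
  | none =>
    simp [count_height_fuel, pvChildren, hg, pvLmax]
  | some cs =>
    have hk : n ∈ (PySem.Dict.mk tree).keys := by
      by_contra hnk
      rw [(PySem.Dict.get?_eq_none_iff_not_mem_keys _ _).mpr hnk] at hg
      exact (Option.some_ne_none cs hg.symm).elim
    have hk' : n ∈ List.map (fun x => x.1) tree := hk
    simp [count_height_fuel, pvChildren, hg, hk', pvLmax]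

lemma count_height_fuel_nonneg (tree : List (Int × List Int)) (s : Nat) (n : Int) :
    0 ≤ count_height_fuel tree s n := by
  cases s with
  | zero => exact zero_le_one
  | succ s =>
    rw [count_height_fuel_succ]
    have := pvLmax_nonneg (count_height_fuel tree s) (pvChildren tree n)
    omega

lemma pvLongPath_step (tree : List (Int × List Int)) (s : Nat) (n : Int)
    (h : pvLongPath tree (s+1) n = false) :
    ∀ c ∈ pvChildren tree n, pvLongPath tree s c = false := by
  intro c hc
  cases hg : (PySem.Dict.mk tree).get? n with
  | none => simp only [pvChildren, hg] at hc; exact absurd hc (List.not_mem_nil)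
  | some cs =>
    simp only [pvLongPath, hg, List.any_eq_false] at h
    simp only [pvChildren, hg] at hc
    by_cases hk : n ∈ (PySem.Dict.mk tree).keys
    · rw [if_pos hk] at hc; simpa using h c hc
    · rw [if_neg hk] at hc; exact absurd hc (List.not_mem_nil)

-- B's frontier-building loop is the flatMap of pvChildren
lemma next_eq_flatMap (tree : List (Int × List Int)) (queue : List Int) :
    queue.foldl (fun acc node =>
      match (PySem.Dict.mk tree).get? node with
      | some cs => if node ∈ (PySem.Dict.mk tree).keys then acc ++ cs else acc
      | none => acc) [] = queue.flatMap (pvChildren tree) := by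
  have hbody : (fun (acc : List Int) (node : Int) =>
      match (PySem.Dict.mk tree).get? node with
      | some cs => if node ∈ (PySem.Dict.mk tree).keys then acc ++ cs else acc
      | none => acc) = fun acc node => acc ++ pvChildren tree node := by
    funext acc node
    cases hg : (PySem.Dict.mk tree).get? node with
    | none => simp [pvChildren, hg]
    | some cs => simp only [pvChildren, hg]; split <;> simp
  rw [hbody, PySem.List.foldl_append_eq_flatMap]
  simp

-- MAIN: the BFS level count from a frontier whose nodes all admit no path of s edges
-- equals level + the maximum of A's (fuel-s) heights over the frontier.
lemma bfs_eq (tree : List (Int × List Int)) :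
    ∀ (s : Nat) (F : List Int) (level : Int),
      (∀ n ∈ F, pvLongPath tree s n = false) →
      count_height_bfs tree s F level = level + pvLmax (count_height_fuel tree s) F := by
  intro s
  induction s with
  | zero =>
    intro F level hF
    cases F with
    | nil => simp [count_height_bfs, pvLmax]
    | cons n F =>
      have := hF n (List.mem_cons_self)
      simp [pvLongPath] at this
  | succ s ih =>
    intro F level hF
    cases hFe : F with
    | nil => simp [count_height_bfs, pvLmax]
    | cons n0 F0 =>
      subst hFe
      have hne : (n0 :: F0) ≠ ([] : List Int) := by simp
      unfold count_height_bfs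
      rw [if_neg hne, next_eq_flatMap]
      have hnext : ∀ c ∈ (n0 :: F0).flatMap (pvChildren tree), pvLongPath tree s c = false := by
        intro c hc
        rw [List.mem_flatMap] at hc
        obtain ⟨n, hn, hcn⟩ := hc
        exact pvLongPath_step tree s n (hF n hn) c hcn
      rw [ih _ _ hnext, pvLmax_flatMap]
      have hpt : pvLmax (count_height_fuel tree (s+1)) (n0 :: F0)
          = pvLmax (fun n => 1 + pvLmax (count_height_fuel tree s) (pvChildren tree n)) (n0 :: F0) := by
        unfold pvLmax
        congr 1
        funext m n
        rw [count_height_fuel_succ]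
        rfl
      rw [hpt, pvLmax_one_add _ (fun n => pvLmax_nonneg _ _) _ hne]
      ring

-- ===== VERDICT (by name: the statement is the Claim_ definition above) =====
theorem count_height_spec : Claim_equal_count_height := by
  intro tree parent _hdom hpre
  unfold Spec_count_height count_height count_height_alt
  rw [bfs_eq tree (tree.length + 1) [parent] 0
      (by intro n hn; rw [List.mem_singleton] at hn; subst hn; exact hpre)]
  unfold pvLmax
  simp only [List.foldl_cons, List.foldl_nil]
  rw [max_eq_right (count_height_fuel_nonneg tree _ parent)]
  omega
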